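-- pv_equiv track=rewrite | github.com/taesoobear/IPCDNNwalk | gym_trackSRB/taesooLib/train_utils.py | set_goals
-- ===== SOURCE A (Python) =====
-- def set_goals(vector):
--     goals = []
--     n = len(vector)
--
--     if n == 0:
--         return goals
--
--     i = 0
--     while i < n:
--         if vector[i] == 1:
--             # 如果当前是1，检查是否接下来是0
--             if i + 1 < n and vector[i + 1] == 0:
--                 goals.append(i + 1)  # 将第一个0设为goal
--
--         elif vector[i] == 0:
--             # 如果当前是0，检查是否有连续的0
--             start = i
--             while i < n and vector[i] == 0:
--                 i += 1
--             # i到达的是第一个非0的位置，或者已经到达末尾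
--             if start > 0 or (start == 0 and i > 1):  # 确保不是第一位，但第二位的情况应考虑
--                 goals.append(i - 1)
--             continue
--
--         i += 1
--
--     # 处理最后一位是1的情况
--     if vector[-1] == 1:
--         goals.append(n - 1)
--
--     # 去重并排序
--     return sorted(set(goals))
-- ===== SOURCE B (Python) =====
-- def set_goals(vector):
--     n = len(vector)
--     goals = {j for j in range(1, n)
--              if vector[j] == 0 and (j + 1 == n or vector[j + 1] != 0 or vector[j - 1] == 1)}
--     if n and vector[-1] == 1:
--         goals.add(n - 1)
--     return sorted(goals)
-- ===== Notes on version B (the rewrite author's own statement) =====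
-- stated objective: simpler
-- what changed: Replaces A's run-consuming state machine (inner while-loop that jumps the index over zero-runs, plus a separate 1-then-0 lookahead) with a single fixed-step set comprehension using a local neighbour predicate per index, plus the trailing-1 case.
import Mathlib
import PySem

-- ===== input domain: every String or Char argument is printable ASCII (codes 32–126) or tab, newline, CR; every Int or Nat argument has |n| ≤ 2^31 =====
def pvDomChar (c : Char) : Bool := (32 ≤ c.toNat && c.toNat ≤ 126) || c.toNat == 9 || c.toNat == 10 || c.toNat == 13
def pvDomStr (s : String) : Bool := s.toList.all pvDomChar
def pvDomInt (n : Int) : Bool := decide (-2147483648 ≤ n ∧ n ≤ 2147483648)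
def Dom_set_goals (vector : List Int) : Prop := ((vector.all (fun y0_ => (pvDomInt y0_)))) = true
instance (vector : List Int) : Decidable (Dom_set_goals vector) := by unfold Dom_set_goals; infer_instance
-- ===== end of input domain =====

-- B replaces A's run-consuming state machine by a single fixed-step neighbour-predicate set comprehension (objective: simpler).

-- ===== PORT A =====
-- A's inner while: advance i while i < n and vector[i] == 0
def set_goals_run (v : List Int) (i : Nat) : Nat :=
  if h : i < v.length ∧ v.getD i 0 = 0 then set_goals_run v (i + 1) else i
termination_by v.length - i
decreasing_by omega

-- cited by set_goals_loop's termination proof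
theorem set_goals_run_ge (v : List Int) : ∀ (m i : Nat), v.length - i ≤ m → i ≤ set_goals_run v i := by
  intro m
  induction m with
  | zero =>
    intro i hm
    rw [set_goals_run]
    split
    next h => exact absurd h.1 (by omega)
    next => exact le_refl i
  | succ m ih =>
    intro i hm
    rw [set_goals_run]
    split
    next h => exact le_trans (Nat.le_succ i) (ih (i + 1) (by omega))
    next => exact le_refl i

-- cited by set_goals_loop's termination proof
theorem set_goals_run_gt (v : List Int) (i : Nat) (hi : i < v.length) (h0 : v.getD i 0 = 0) :
    i < set_goals_run v i := by
  rw [set_goals_run, dif_pos ⟨hi, h0⟩]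
  exact Nat.lt_of_lt_of_le (Nat.lt_succ_self i) (set_goals_run_ge v (v.length - (i + 1)) (i + 1) (by omega))

-- A's outer while loop (the zero-branch jumps the index to the end of the zero-run, as A does)
def set_goals_loop (v : List Int) (i : Nat) (goals : List Int) : List Int :=
  if hi : i < v.length then
    if v.getD i 0 = 1 then
      set_goals_loop v (i + 1)
        (if i + 1 < v.length ∧ v.getD (i + 1) 0 = 0 then goals ++ [(i : Int) + 1] else goals)
    else if h0 : v.getD i 0 = 0 then
      set_goals_loop v (set_goals_run v i)
        (if 0 < i ∨ 1 < set_goals_run v i then goals ++ [(set_goals_run v i : Int) - 1] else goals)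
    else
      set_goals_loop v (i + 1) goals
  else goals
termination_by v.length - i
decreasing_by
  · omega
  · have := set_goals_run_gt v i hi h0; omega
  · omega

def set_goals (vector : List Int) : List Int :=
  let n := vector.length
  if n = 0 then []
  else
    let goals := set_goals_loop vector 0 []
    let goals := if PySem.List.pyGetD vector (-1) 0 = 1 then goals ++ [(n : Int) - 1] else goals
    PySem.List.sorted (PySem.Set.ofList goals) (fun x => x)

-- ===== PORT B =====
def set_goals_alt (vector : List Int) : List Int :=
  let n : Int := vector.length
  let goals : PySem.Set Int :=
    (PySem.List.pyRange 1 n).foldl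
      (fun s j =>
        if PySem.List.pyGetD vector j 0 = 0 ∧
            (j + 1 = n ∨ PySem.List.pyGetD vector (j + 1) 0 ≠ 0 ∨ PySem.List.pyGetD vector (j - 1) 0 = 1)
        then PySem.Set.add s j else s)
      PySem.Set.empty
  let goals := if n ≠ 0 ∧ PySem.List.pyGetD vector (-1) 0 = 1 then PySem.Set.add goals (n - 1) else goals
  PySem.List.sorted goals (fun x => x)

-- ===== PRECONDITION & SPEC =====
def Spec_set_goals (vector : List Int) (out : List Int) : Prop := out = set_goals_alt vector
instance (vector : List Int) (out : List Int) : Decidable (Spec_set_goals vector out) := by unfold Spec_set_goals; infer_instance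

-- ===== CLAIM (what is proved, stated in full; the proofs are below) =====
def Claim_equal_set_goals : Prop := ∀ (vector : List Int), Dom_set_goals vector → Spec_set_goals vector (set_goals vector)

-- ===== LEMMAS AND PROOFS =====

-- the indices A's loop (started at i) appends: zeros that end a run, or follow a 1 strictly after i
def pvCond (v : List Int) (i : Nat) (x : Int) : Prop :=
  ∃ j : Nat, x = (j : Int) ∧ 1 ≤ j ∧ j < v.length ∧ v.getD j 0 = 0 ∧
    ((i < j ∧ v.getD (j - 1) 0 = 1) ∨ (i ≤ j ∧ (j + 1 = v.length ∨ v.getD (j + 1) 0 ≠ 0)))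

theorem pvCond_mono (v : List Int) (x : Int) {i i' : Nat} (h : i ≤ i') :
    pvCond v i' x → pvCond v i x := by
  rintro ⟨j, rfl, hj1, hj2, hj0, ⟨hij, hp⟩ | ⟨hij, hB⟩⟩
  · exact ⟨j, rfl, hj1, hj2, hj0, Or.inl ⟨by omega, hp⟩⟩
  · exact ⟨j, rfl, hj1, hj2, hj0, Or.inr ⟨by omega, hB⟩⟩

theorem pvRun_facts (v : List Int) : ∀ (m i : Nat), v.length - i ≤ m → i < v.length → v.getD i 0 = 0 →
    set_goals_run v i ≤ v.length ∧
    (∀ k, i ≤ k → k < set_goals_run v i → v.getD k 0 = 0) ∧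
    (set_goals_run v i < v.length → v.getD (set_goals_run v i) 0 ≠ 0) := by
  intro m
  induction m with
  | zero => intro i hm hi h0; exact absurd hi (by omega)
  | succ m ih =>
    intro i hm hi h0
    rw [set_goals_run, dif_pos ⟨hi, h0⟩]
    by_cases hc : i + 1 < v.length ∧ v.getD (i + 1) 0 = 0
    · obtain ⟨h2, hz, hs⟩ := ih (i + 1) (by omega) hc.1 hc.2
      refine ⟨h2, ?_, hs⟩
      intro k hk1 hk2
      rcases Nat.eq_or_lt_of_le hk1 with rfl | h
      · exact h0
      · exact hz k (by omega) hk2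
    · have hstep : set_goals_run v (i + 1) = i + 1 := by
        rw [set_goals_run, dif_neg hc]
      rw [hstep]
      refine ⟨by omega, ?_, ?_⟩
      · intro k hk1 hk2
        have : k = i := by omega
        subst this; exact h0
      · intro hlt heq; exact hc ⟨hlt, heq⟩

theorem pvStep_one (v : List Int) (i : Nat) (hi : i < v.length) (h1 : v.getD i 0 = 1) (x : Int) :
    pvCond v i x ↔ ((i + 1 < v.length ∧ v.getD (i + 1) 0 = 0) ∧ x = (i : Int) + 1) ∨ pvCond v (i + 1) x := by
  constructor
  · rintro ⟨j, rfl, hj1, hj2, hj0, hd⟩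
    rcases hd with ⟨hij, hprev⟩ | ⟨hij, hB⟩
    · by_cases hji : j = i + 1
      · subst hji
        exact Or.inl ⟨⟨hj2, hj0⟩, by push_cast; ring⟩
      · exact Or.inr ⟨j, rfl, hj1, hj2, hj0, Or.inl ⟨by omega, hprev⟩⟩
    · have hne : j ≠ i := by
        rintro rfl; rw [hj0] at h1; omega
      exact Or.inr ⟨j, rfl, hj1, hj2, hj0, Or.inr ⟨by omega, hB⟩⟩
  · rintro (⟨⟨hlt, h0⟩, rfl⟩ | h)
    · exact ⟨i + 1, by push_cast; ring, by omega, hlt, h0, Or.inl ⟨by omega, by simpa using h1⟩⟩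
    · exact pvCond_mono v x (by omega) h

theorem pvStep_zero (v : List Int) (i e : Nat) (he1 : i < e) (he2 : e ≤ v.length)
    (hz : ∀ k, i ≤ k → k < e → v.getD k 0 = 0) (hs : e < v.length → v.getD e 0 ≠ 0) (x : Int) :
    pvCond v i x ↔ ((0 < i ∨ 1 < e) ∧ x = (e : Int) - 1) ∨ pvCond v e x := by
  constructor
  · rintro ⟨j, rfl, hj1, hj2, hj0, hd⟩
    rcases hd with ⟨hij, hprev⟩ | ⟨hij, hB⟩
    · by_cases hje : j < e
      · have : v.getD (j - 1) 0 = 0 := hz (j - 1) (by omega) (by omega)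
        rw [this] at hprev; omega
      · have hjgt : e < j := by
          rcases Nat.eq_or_lt_of_le (Nat.le_of_not_lt hje) with rfl | h
          · exact absurd hj0 (hs hj2)
          · exact h
        exact Or.inr ⟨j, rfl, hj1, hj2, hj0, Or.inl ⟨hjgt, hprev⟩⟩
    · by_cases hje : j < e
      · by_cases hje1 : j < e - 1
        · rcases hB with h | h
          · omega
          · have : v.getD (j + 1) 0 = 0 := hz (j + 1) (by omega) (by omega)
            exact absurd this h
        · have hj : j = e - 1 := by omega
          exact Or.inl ⟨Or.inr (by omega), by omega⟩
      · have hjgt : e < j := by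
          rcases Nat.eq_or_lt_of_le (Nat.le_of_not_lt hje) with rfl | h
          · rcases hB with h | h
            · exact absurd hj0 (hs (by omega))
            · exact absurd hj0 (hs hj2)
          · exact h
        exact Or.inr ⟨j, rfl, hj1, hj2, hj0, Or.inr ⟨by omega, hB⟩⟩
  · rintro (⟨hap, rfl⟩ | h)
    · refine ⟨e - 1, by omega, by omega, by omega, hz (e - 1) (by omega) (by omega), Or.inr ⟨by omega, ?_⟩⟩
      have hee : e - 1 + 1 = e := by omega
      rw [hee]
      by_cases hel : e = v.length
      · exact Or.inl hel
      · exact Or.inr (hs (by omega))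
    · exact pvCond_mono v x (by omega) h

theorem pvStep_other (v : List Int) (i : Nat) (h1 : v.getD i 0 ≠ 1) (h0 : v.getD i 0 ≠ 0) (x : Int) :
    pvCond v i x ↔ pvCond v (i + 1) x := by
  constructor
  · rintro ⟨j, rfl, hj1, hj2, hj0, hd⟩
    rcases hd with ⟨hij, hprev⟩ | ⟨hij, hB⟩
    · have hne : j ≠ i + 1 := by
        rintro rfl
        simp only [Nat.add_sub_cancel] at hprev
        exact h1 hprev
      exact ⟨j, rfl, hj1, hj2, hj0, Or.inl ⟨by omega, hprev⟩⟩
    · have hne : j ≠ i := by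
        rintro rfl; exact h0 hj0
      exact ⟨j, rfl, hj1, hj2, hj0, Or.inr ⟨by omega, hB⟩⟩
  · exact pvCond_mono v x (by omega)

theorem pvMem_loop (v : List Int) : ∀ (m i : Nat) (goals : List Int) (x : Int), v.length - i ≤ m →
    (x ∈ set_goals_loop v i goals ↔ x ∈ goals ∨ pvCond v i x) := by
  intro m
  induction m with
  | zero =>
    intro i goals x hm
    rw [set_goals_loop, dif_neg (by omega : ¬ i < v.length)]
    constructor
    · exact Or.inl
    · rintro (h | ⟨j, rfl, hj1, hj2, hj0, ⟨hij, _⟩ | ⟨hij, _⟩⟩)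
      exacts [h, absurd hj2 (by omega), absurd hj2 (by omega)]
  | succ m ih =>
    intro i goals x hm
    rw [set_goals_loop]
    by_cases hi : i < v.length
    · rw [dif_pos hi]
      by_cases h1 : v.getD i 0 = 1
      · rw [if_pos h1, ih (i + 1) _ x (by omega), pvStep_one v i hi h1 x]
        by_cases hc : i + 1 < v.length ∧ v.getD (i + 1) 0 = 0
        · rw [if_pos hc]
          simp only [List.mem_append, List.mem_singleton]
          tauto
        · rw [if_neg hc]; tauto
      · rw [if_neg h1]
        by_cases h0 : v.getD i 0 = 0
        · rw [dif_pos h0]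
          obtain ⟨he2, hz, hs⟩ := pvRun_facts v v.length i (by omega) hi h0
          have he1 : i < set_goals_run v i := set_goals_run_gt v i hi h0
          rw [ih (set_goals_run v i) _ x (by omega),
            pvStep_zero v i (set_goals_run v i) he1 he2 hz hs x]
          by_cases hap : 0 < i ∨ 1 < set_goals_run v i
          · rw [if_pos hap]
            simp only [List.mem_append, List.mem_singleton]
            tauto
          · rw [if_neg hap]; tauto
        · rw [dif_neg h0, ih (i + 1) _ x (by omega), pvStep_other v i h1 h0 x]
    · rw [dif_neg hi]
      constructor
      · exact Or.inl
      · rintro (h | ⟨j, rfl, hj1, hj2, hj0, ⟨hij, _⟩ | ⟨hij, _⟩⟩)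
        exacts [h, absurd hj2 (by omega), absurd hj2 (by omega)]

theorem pvNodup_add (s : PySem.Set Int) (x : Int) (hs : s.Nodup) : (PySem.Set.add s x).Nodup := by
  by_cases h : x ∈ s
  · have : PySem.Set.add s x = s := by
      simp [PySem.Set.add, PySem.Set.contains, h]
    rw [this]; exact hs
  · have : PySem.Set.add s x = s ++ [x] := by
      simp [PySem.Set.add, PySem.Set.contains, h]
    rw [this]
    refine List.Nodup.append hs (List.nodup_singleton x) ?_
    intro b hb hbx
    rw [List.mem_singleton] at hbx
    exact h (hbx ▸ hb)

theorem pvMem_fold (P : Int → Prop) [DecidablePred P] :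
    ∀ (l : List Int) (s : PySem.Set Int) (x : Int),
      (x ∈ l.foldl (fun s j => if P j then PySem.Set.add s j else s) s ↔
        x ∈ s ∨ ∃ j ∈ l, P j ∧ x = j) := by
  intro l
  induction l with
  | nil => intro s x; simp
  | cons a l ih =>
    intro s x
    simp only [List.foldl_cons, List.mem_cons]
    rw [ih]
    by_cases hp : P a
    · rw [if_pos hp]
      have hadd := PySem.Set.mem_add s a x
      constructor
      · rintro (h | ⟨j, hj, hpj, hx⟩)
        · rcases hadd.mp h with h' | he
          · exact Or.inl h'
          · exact Or.inr ⟨a, Or.inl rfl, hp, he⟩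
        · exact Or.inr ⟨j, Or.inr hj, hpj, hx⟩
      · rintro (h | ⟨j, haj | hj, hpj, hx⟩)
        · exact Or.inl (hadd.mpr (Or.inl h))
        · exact Or.inl (hadd.mpr (Or.inr (haj ▸ hx)))
        · exact Or.inr ⟨j, hj, hpj, hx⟩
    · rw [if_neg hp]
      constructor
      · rintro (h | ⟨j, hj, hpj, hx⟩)
        exacts [Or.inl h, Or.inr ⟨j, Or.inr hj, hpj, hx⟩]
      · rintro (h | ⟨j, haj | hj, hpj, hx⟩)
        exacts [Or.inl h, absurd (haj ▸ hpj) hp, Or.inr ⟨j, hj, hpj, hx⟩]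

theorem pvNodup_fold (P : Int → Prop) [DecidablePred P] :
    ∀ (l : List Int) (s : PySem.Set Int), s.Nodup →
      (l.foldl (fun s j => if P j then PySem.Set.add s j else s) s).Nodup := by
  intro l
  induction l with
  | nil => intro s hs; exact hs
  | cons a l ih =>
    intro s hs
    simp only [List.foldl_cons]
    apply ih
    by_cases hp : P a
    · rw [if_pos hp]; exact pvNodup_add s a hs
    · rw [if_neg hp]; exact hs

theorem pvCond_zero (v : List Int) (x : Int) :
    pvCond v 0 x ↔ ∃ j ∈ PySem.List.pyRange 1 (v.length : Int),
      (PySem.List.pyGetD v j 0 = 0 ∧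
        (j + 1 = (v.length : Int) ∨ PySem.List.pyGetD v (j + 1) 0 ≠ 0 ∨ PySem.List.pyGetD v (j - 1) 0 = 1)) ∧
      x = j := by
  constructor
  · rintro ⟨j, rfl, hj1, hj2, hj0, hd⟩
    refine ⟨(j : Int), PySem.List.mem_pyRange_one.mpr ⟨by omega, by omega⟩, ⟨?_, ?_⟩, rfl⟩
    · rw [PySem.List.pyGetD_natCast]; exact hj0
    · rcases hd with ⟨_, hprev⟩ | ⟨_, hB⟩
      · right; right
        have hc : ((j : Int) - 1) = ((j - 1 : Nat) : Int) := by omega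
        rw [hc, PySem.List.pyGetD_natCast]; exact hprev
      · rcases hB with h | h
        · left; omega
        · right; left
          have hc : ((j : Int) + 1) = ((j + 1 : Nat) : Int) := by omega
          rw [hc, PySem.List.pyGetD_natCast]; exact h
  · rintro ⟨j, hjr, ⟨hj0, hB⟩, hx⟩
    obtain ⟨hj1, hj2⟩ := PySem.List.mem_pyRange_one.mp hjr
    have hcj : j = ((j.toNat : Nat) : Int) := by omega
    rw [hcj, PySem.List.pyGetD_natCast] at hj0
    refine ⟨j.toNat, by omega, by omega, by omega, hj0, ?_⟩
    rcases hB with h | h | h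
    · exact Or.inr ⟨by omega, Or.inl (by omega)⟩
    · refine Or.inr ⟨by omega, Or.inr ?_⟩
      have hc : (j + 1 : Int) = ((j.toNat + 1 : Nat) : Int) := by omega
      rw [hc, PySem.List.pyGetD_natCast] at h
      exact h
    · refine Or.inl ⟨by omega, ?_⟩
      have hc : (j - 1 : Int) = ((j.toNat - 1 : Nat) : Int) := by omega
      rw [hc, PySem.List.pyGetD_natCast] at h
      exact h

theorem pvMain (v : List Int) : set_goals v = set_goals_alt v := by
  by_cases hn : v.length = 0
  · obtain rfl := List.length_eq_zero_iff.mp hn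
    rfl
  · have hloop : ∀ x : Int, x ∈ set_goals_loop v 0 [] ↔ pvCond v 0 x := by
      intro x
      rw [pvMem_loop v v.length 0 [] x (by omega)]
      simp
    have hnz : ((v.length : Int)) ≠ 0 := by omega
    simp only [set_goals, set_goals_alt, if_neg hn]
    rw [PySem.List.sorted_id_eq_sorted_id_iff_perm]
    have hmemF := pvMem_fold
      (fun j => PySem.List.pyGetD v j 0 = 0 ∧
        (j + 1 = (v.length : Int) ∨ PySem.List.pyGetD v (j + 1) 0 ≠ 0 ∨ PySem.List.pyGetD v (j - 1) 0 = 1))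
      (PySem.List.pyRange 1 (v.length : Int)) PySem.Set.empty
    have hnodF := pvNodup_fold
      (fun j => PySem.List.pyGetD v j 0 = 0 ∧
        (j + 1 = (v.length : Int) ∨ PySem.List.pyGetD v (j + 1) 0 ≠ 0 ∨ PySem.List.pyGetD v (j - 1) 0 = 1))
      (PySem.List.pyRange 1 (v.length : Int)) PySem.Set.empty (by simp [PySem.Set.empty])
    by_cases htr : PySem.List.pyGetD v (-1) 0 = 1
    · rw [if_pos htr, if_pos ⟨hnz, htr⟩]
      rw [List.perm_ext_iff_of_nodup (PySem.Set.nodup_ofList _) (pvNodup_add _ _ hnodF)]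
      intro a
      rw [PySem.Set.mem_ofList, PySem.Set.mem_add, List.mem_append, List.mem_singleton, hmemF a]
      rw [hloop a, pvCond_zero v a]
      simp only [PySem.Set.empty, List.not_mem_nil, false_or]
    · rw [if_neg htr, if_neg (by tauto : ¬ (((v.length : Int)) ≠ 0 ∧ PySem.List.pyGetD v (-1) 0 = 1))]
      rw [List.perm_ext_iff_of_nodup (PySem.Set.nodup_ofList _) hnodF]
      intro a
      rw [PySem.Set.mem_ofList, hmemF a, hloop a, pvCond_zero v a]
      simp only [PySem.Set.empty, List.not_mem_nil, false_or]

-- ===== VERDICT (by name: the statement is the Claim_ definition above) =====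
theorem set_goals_spec : Claim_equal_set_goals := by
  intro vector _
  unfold Spec_set_goals
  exact pvMain vector
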